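-- pv_equiv track=rewrite | github.com/cesarsdias/Tese-PGMICRO | Script - Ordenamento de Ciclos da Expressão SOP/Arranjo_de_Termos.py | get_term_cells
-- ===== SOURCE A (Python) =====
-- def get_term_cells(term_map, num_vars):
--     cells = []     # lista com as células do Kmap cobertas pelo termo
--     for val in range(2 ** num_vars):
--         binary = f"{val:0{num_vars}b}"
--         match = 1
--         for i, var in enumerate(term_map):
--             if term_map[var] != -1 and term_map[var] != int(binary[i]):
--                 match = 0
--                 break
--         if match == 1:
--             cells.append(val)
--     return cells
-- ===== SOURCE B (Python) =====
-- def get_term_cells(term_map, num_vars):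
--     # Fix the determined bits once; enumerate only the don't-care bit
--     # combinations, emitting cells in ascending order.
--     vals = list(term_map.values())
--     tv = [vals[i] if i < len(vals) else -1 for i in range(num_vars)]
--     base = 0
--     offsets = [0]
--     for i, v in enumerate(tv):
--         w = 1 << (num_vars - 1 - i)
--         if v == -1:
--             offsets = [o + b for o in offsets for b in (0, w)]
--         elif v == 1:
--             base += w
--         elif v != 0:
--             return []
--     return [base + o for o in offsets]
-- ===== Notes on version B (the rewrite author's own statement) =====
-- stated objective: faster
-- what changed: Instead of testing every one of the 2^num_vars cells against the term with an inner loop over all variables, B fixes the determined bits into a single base value once and enumerates only the don't-care bit combinations (expanding an ascending offset list), emitting the covered cells directly in ascending order; intended as asymptotically faster: a timing run measured 2025x at the largest size on which A still finished (n=64), and A timed out on larger inputs where B returned in under a millisecond, though too few both-finished inputs existed for that run to confirm the label.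
-- intended difference: When num_vars = 0 and the dict's first value is outside {-1, 0}, A returns [] only because Python's binary format emits a phantom digit '0' even for width 0; B returns [0], the whole single-cell map, which is the intended meaning of a term over zero variables. — e.g. on get_term_cells([("a", 1)], 0): A returns [], B returns [0]
import Mathlib
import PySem

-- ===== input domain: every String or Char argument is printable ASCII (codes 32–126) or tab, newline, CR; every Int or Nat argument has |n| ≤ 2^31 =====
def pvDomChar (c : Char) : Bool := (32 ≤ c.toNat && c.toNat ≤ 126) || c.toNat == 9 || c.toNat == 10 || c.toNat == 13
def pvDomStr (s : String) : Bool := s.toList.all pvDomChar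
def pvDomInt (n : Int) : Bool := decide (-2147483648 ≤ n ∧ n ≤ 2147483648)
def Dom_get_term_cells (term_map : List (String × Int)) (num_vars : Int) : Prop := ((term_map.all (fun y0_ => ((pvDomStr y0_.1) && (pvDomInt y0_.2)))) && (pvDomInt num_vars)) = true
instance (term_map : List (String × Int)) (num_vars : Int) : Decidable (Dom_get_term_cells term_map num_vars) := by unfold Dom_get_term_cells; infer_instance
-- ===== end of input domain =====

-- B fixes the determined bits once and enumerates only the don't-care bit
-- combinations (ascending), instead of testing every one of the 2^num_vars cells.

-- ===== PORT A =====

-- int(binary[i]); exact because the characters of a binary format string are '0'/'1'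
def pvCInt (c : Char) : Int := if c = '1' then 1 else 0

-- f"{v:0{w}b}" for 0 ≤ v < 2^w (the only way A calls it): exactly w zero-padded
-- binary digits, except that Python prints the single digit '0' when w = 0 (v = 0).
def pvBinCore : Nat → Nat → List Char
  | _, 0 => []
  | v, w + 1 => (if 2 ^ w ≤ v then '1' else '0') :: pvBinCore (v % 2 ^ w) w

def pvBinStr (v w : Nat) : List Char := if w = 0 then ['0'] else pvBinCore v w

-- inner 'for i, var in enumerate(term_map)' loop; consumes one binary char per key
-- (= binary[i]); 'match = 0; break' is the false result.  binary[i] out of range is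
-- IndexError in Python (reached only when term_map[var] != -1): Pre_ excludes it.
def pvMatchLoop (d : PySem.Dict String Int) : List (String × Int) → List Char → Bool
  | [], _ => true
  | (k, _) :: rest, bs =>
      let tv := (d.get? k).getD 0   -- term_map[var]: k is an iterated key, always present
      if tv = -1 then pvMatchLoop d rest bs.tail
      else
        match bs with
        | [] => false               -- IndexError in Python; outside Pre_
        | c :: bs' => if tv ≠ pvCInt c then false else pvMatchLoop d rest bs'

def get_term_cells (term_map : List (String × Int)) (num_vars : Int) : List Int :=
  let d := PySem.Dict.ofList term_map
  -- range(2 ** num_vars): for num_vars < 0 Python raises TypeError (float); Pre_ excludes,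
  -- so .toNat is exact here
  (PySem.List.pyRange 0 ((2 : Int) ^ num_vars.toNat) 1).foldl
    (fun cells val =>
      let binary := pvBinStr val.toNat num_vars.toNat   -- 0 ≤ val < 2^num_vars on the range
      if pvMatchLoop d d.items binary then cells ++ [val] else cells) []

-- ===== PORT B =====

-- loop over tv with index i; w = 1 << (num_vars - 1 - i) = 2 ^ rest.length
def pvAltLoop : List Int → Int → List Int → Option (Int × List Int)
  | [], base, offsets => some (base, offsets)
  | v :: rest, base, offsets =>
      let w : Int := 2 ^ rest.length
      if v = -1 then pvAltLoop rest base (offsets.flatMap (fun o => [o, o + w]))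
      else if v = 1 then pvAltLoop rest (base + w) offsets
      else if v = 0 then pvAltLoop rest base offsets
      else none                      -- 'return []'

def get_term_cells_alt (term_map : List (String × Int)) (num_vars : Int) : List Int :=
  let vals := (PySem.Dict.ofList term_map).values
  let tv := (List.range num_vars.toNat).map (fun i => vals.getD i (-1))
  match pvAltLoop tv 0 [0] with
  | some (base, offsets) => offsets.map (fun o => base + o)
  | none => []

-- ===== PRECONDITION & SPEC =====

-- Pre_ excludes exactly the inputs where A raises: num_vars < 0 (TypeError on
-- range(2**num_vars)), and the IndexError reached when the dict has more keys than
-- binary digits (len(binary) = max(num_vars,1)), some extra key's value is not -1,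
-- and the values over the binary digits are satisfiable so some val survives to it.
def Pre_get_term_cells (term_map : List (String × Int)) (num_vars : Int) : Prop :=
  0 ≤ num_vars ∧
  ¬ (((PySem.Dict.ofList term_map).values.drop (max num_vars.toNat 1)).any (fun v => !(v == -1)) = true ∧
     ((PySem.Dict.ofList term_map).values.take (max num_vars.toNat 1)).all
       (fun v => v == -1 || v == 0 || (decide (num_vars ≠ 0) && v == 1)) = true)
instance (term_map : List (String × Int)) (num_vars : Int) : Decidable (Pre_get_term_cells term_map num_vars) := by unfold Pre_get_term_cells; infer_instance

def pvWitness_get_term_cells : (List (String × Int)) × Int := ([("a", 1), ("b", -1)], 2)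

-- With num_vars = 0 and a first dict value outside {-1, 0}, A returns [] only because
-- Python's binary format emits a phantom digit '0' even for width 0; B returns [0],
-- the whole (single-cell) map, which is the intended meaning of a width-0 term.
def D_get_term_cells (term_map : List (String × Int)) (num_vars : Int) : Prop :=
  num_vars = 0 ∧ (PySem.Dict.ofList term_map).values ≠ [] ∧
  (PySem.Dict.ofList term_map).values.headD 0 ≠ -1 ∧
  (PySem.Dict.ofList term_map).values.headD 0 ≠ 0
instance (term_map : List (String × Int)) (num_vars : Int) : Decidable (D_get_term_cells term_map num_vars) := by unfold D_get_term_cells; infer_instance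

def Spec_get_term_cells (term_map : List (String × Int)) (num_vars : Int) (out : List Int) : Prop := ¬ D_get_term_cells term_map num_vars → out = get_term_cells_alt term_map num_vars
instance (term_map : List (String × Int)) (num_vars : Int) (out : List Int) : Decidable (Spec_get_term_cells term_map num_vars out) := by unfold Spec_get_term_cells; infer_instance

def pvDiffWitness_get_term_cells : (List (String × Int)) × Int := ([("a", 1)], 0)
def pvDiffWitnessOut_get_term_cells : (List Int) × (List Int) := ([], [0])

-- ===== CLAIM =====
def Claim_unchanged_get_term_cells : Prop := ∀ (term_map : List (String × Int)) (num_vars : Int), Dom_get_term_cells term_map num_vars → Pre_get_term_cells term_map num_vars → Spec_get_term_cells term_map num_vars (get_term_cells term_map num_vars)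
def Claim_changed_get_term_cells : Prop := Dom_get_term_cells (pvDiffWitness_get_term_cells.1) (pvDiffWitness_get_term_cells.2) ∧ Pre_get_term_cells (pvDiffWitness_get_term_cells.1) (pvDiffWitness_get_term_cells.2) ∧ D_get_term_cells (pvDiffWitness_get_term_cells.1) (pvDiffWitness_get_term_cells.2) ∧ get_term_cells (pvDiffWitness_get_term_cells.1) (pvDiffWitness_get_term_cells.2) = pvDiffWitnessOut_get_term_cells.1 ∧ get_term_cells_alt (pvDiffWitness_get_term_cells.1) (pvDiffWitness_get_term_cells.2) = pvDiffWitnessOut_get_term_cells.2 ∧ pvDiffWitnessOut_get_term_cells.1 ≠ pvDiffWitnessOut_get_term_cells.2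
def Claim_exact_get_term_cells : Prop := ∀ (term_map : List (String × Int)) (num_vars : Int), Dom_get_term_cells term_map num_vars → Pre_get_term_cells term_map num_vars → D_get_term_cells term_map num_vars → get_term_cells term_map num_vars ≠ get_term_cells_alt term_map num_vars


-- ===== LEMMAS AND PROOFS =====

-- A's inner loop with every dict lookup resolved to the iterated entry's value
def pvRaw : List Int → List Char → Bool
  | [], _ => true
  | v :: rest, bs =>
      if v = -1 then pvRaw rest bs.tail
      else
        match bs with
        | [] => false
        | c :: bs' => if v ≠ pvCInt c then false else pvRaw rest bs'

-- common specification: the matching cells of an MSB-first value list, ascending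
def pvSpec : List Int → List Int
  | [] => [0]
  | v :: tv =>
      (if v = 0 ∨ v = -1 then pvSpec tv else []) ++
      (if v = 1 ∨ v = -1 then (pvSpec tv).map (fun x => 2 ^ tv.length + x) else [])

def pvTvOf (n : Nat) (vals : List Int) : List Int :=
  (List.range n).map (fun i => vals.getD i (-1))

theorem pvMatchLoop_eq_raw (d : PySem.Dict String Int) (l : List (String × Int))
    (hl : ∀ p ∈ l, p ∈ d.items) (hnd : d.keys.Nodup) (bs : List Char) :
    pvMatchLoop d l bs = pvRaw (l.map Prod.snd) bs := by
  induction l generalizing bs with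
  | nil => rfl
  | cons p rest ih =>
    obtain ⟨k, v⟩ := p
    have hget : d.get? k = some v :=
      PySem.Dict.get?_of_mem_items d (hl _ (List.mem_cons_self ..)) hnd
    have hrest : ∀ q ∈ rest, q ∈ d.items := fun q hq => hl q (List.mem_cons_of_mem _ hq)
    cases bs <;> simp [pvMatchLoop, pvRaw, hget, ih hrest]
theorem pvRaw_cons (vals : List Int) (c : Char) (bs : List Char) :
    pvRaw vals (c :: bs) =
      if vals.getD 0 (-1) = -1 ∨ vals.getD 0 (-1) = pvCInt c then pvRaw vals.tail bs else false := by
  cases vals with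
  | nil => simp [pvRaw]
  | cons v vs =>
    by_cases h : v = -1
    · rw [if_pos (by simp [h])]
      simp [pvRaw, h]
    · by_cases h2 : v = pvCInt c
      · rw [if_pos (by simp [h2])]
        simp [pvRaw, h2]
      · rw [if_neg (by simp [h, h2])]
        simp [pvRaw, h, h2]

theorem pvAltLoop_inv (tv : List Int) (base : Int) (offsets : List Int) :
    (match pvAltLoop tv base offsets with
     | some (b, offs) => offs.map (fun o => b + o)
     | none => []) =
    offsets.flatMap (fun o => (pvSpec tv).map (fun x => base + o + x)) := by
  induction tv generalizing base offsets with
  | nil =>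
    simp only [pvAltLoop, pvSpec]
    induction offsets <;> simp_all
  | cons v rest ih =>
    by_cases h1 : v = -1
    · subst h1
      simp only [pvAltLoop, reduceIte, ih, List.flatMap_assoc]
      simp only [pvSpec, List.map_append, or_true, if_true]
      refine List.flatMap_congr (fun o _ => ?_)
      simp only [List.flatMap_cons, List.flatMap_nil, List.append_nil, List.map_map]
      congr 1
      apply List.map_congr_left
      intro x _
      simp only [Function.comp_apply]
      ring
    · by_cases h2 : v = 1
      · subst h2
        rw [show pvAltLoop ((1:Int)::rest) base offsets
              = pvAltLoop rest (base + 2 ^ rest.length) offsets by simp [pvAltLoop]]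
        rw [ih]
        refine List.flatMap_congr (fun o _ => ?_)
        simp only [pvSpec]
        norm_num
        intro a _
        ring
      · by_cases h3 : v = 0
        · subst h3
          rw [show pvAltLoop ((0:Int)::rest) base offsets
                = pvAltLoop rest base offsets by simp [pvAltLoop]]
          rw [ih]
          refine List.flatMap_congr (fun o _ => ?_)
          simp [pvSpec]
        · have e1 : (v = -1) = False := by simp [h1]
          have e2 : (v = 1) = False := by simp [h2]
          have e3 : (v = 0) = False := by simp [h3]
          simp only [pvAltLoop, e1, e2, e3, if_false]
          simp [pvSpec, h1, h2, h3]

theorem pvRaw_nil (vals : List Int) : pvRaw vals [] = vals.all (· == -1) := by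
  induction vals with
  | nil => rfl
  | cons v vs ih => by_cases h : v = -1 <;> simp [pvRaw, h, ih]

theorem pvCastShift (F : List Nat) (k : Nat) :
    F.map (Int.ofNat ∘ fun v => k + v) = (F.map Int.ofNat).map (fun x => (k : Int) + x) := by
  simp only [List.map_map]
  apply List.map_congr_left
  intro x _
  simp only [Function.comp_apply]
  rfl

theorem pvBinCore_low (w v : Nat) (h : v < 2 ^ w) :
    pvBinCore v (w + 1) = '0' :: pvBinCore v w := by
  simp [pvBinCore, Nat.not_le.2 h, Nat.mod_eq_of_lt h]

theorem pvBinCore_high (w v : Nat) (h : v < 2 ^ w) :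
    pvBinCore (2 ^ w + v) (w + 1) = '1' :: pvBinCore v w := by
  simp [pvBinCore, Nat.add_mod_left, Nat.mod_eq_of_lt h]

theorem pvGetD_tail (vals : List Int) (i : Nat) :
    vals.getD (i + 1) (-1) = vals.tail.getD i (-1) := by
  cases vals <;> simp

theorem pvTvOf_succ (n : Nat) (vals : List Int) :
    pvTvOf (n + 1) vals = vals.getD 0 (-1) :: pvTvOf n vals.tail := by
  simp only [pvTvOf, List.range_succ_eq_map, List.map_cons, List.map_map]
  congr 1
  apply List.map_congr_left
  intro i _
  exact pvGetD_tail vals i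

theorem pvTvOf_length (n : Nat) (vals : List Int) : (pvTvOf n vals).length = n := by
  simp [pvTvOf]

theorem pvFilterIte (P : Prop) [Decidable P] (p : Nat → Bool) (l : List Nat) :
    l.filter (fun v => if P then p v else false) = if P then l.filter p else [] := by
  split_ifs <;> simp_all

theorem pvCond_tail (n : Nat) (vals : List Int)
    (hgood : vals.getD 0 (-1) = -1 ∨ vals.getD 0 (-1) = 0 ∨ vals.getD 0 (-1) = 1)
    (hc : (vals.drop (n + 1)).all (· == -1) = true ∨
          ¬ ((vals.take (n + 1)).all (fun v => v == -1 || v == 0 || v == 1) = true)) :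
    (vals.tail.drop n).all (· == -1) = true ∨
      ¬ ((vals.tail.take n).all (fun v => v == -1 || v == 0 || v == 1) = true) := by
  cases vals with
  | nil => left; simp
  | cons w ws =>
    simp only [List.getD_cons_zero] at hgood
    rcases hc with h | h
    · left; simpa using h
    · right
      intro hcon
      apply h
      simp only [List.take_succ_cons, List.all_cons]
      simp only [List.tail_cons] at hcon
      rcases hgood with h1 | h1 | h1 <;> simp [h1, hcon]

theorem pvMain (n : Nat) (vals : List Int)
    (hc : (vals.drop n).all (· == -1) = true ∨
          ¬ ((vals.take n).all (fun v => v == -1 || v == 0 || v == 1) = true)) :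
    ((List.range (2 ^ n)).filter (fun v => pvRaw vals (pvBinCore v n))).map (Int.ofNat)
      = pvSpec (pvTvOf n vals) := by
  induction n generalizing vals with
  | zero =>
    have hall : vals.all (· == -1) = true := by
      rcases hc with h | h
      · simpa using h
      · exact absurd (by simp) h
    have hr : pvRaw vals [] = true := by rw [pvRaw_nil]; exact hall
    simp [pvBinCore, hr, pvTvOf, pvSpec]
  | succ n ih =>
    have hsplit : List.range (2 ^ (n + 1)) =
        List.range (2 ^ n) ++ (List.range (2 ^ n)).map (fun v => 2 ^ n + v) := by
      rw [pow_succ, Nat.mul_two, List.range_add]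
    have hcg1 : ∀ v ∈ List.range (2 ^ n), pvRaw vals (pvBinCore v (n + 1))
        = (if vals.getD 0 (-1) = -1 ∨ vals.getD 0 (-1) = 0 then
             pvRaw vals.tail (pvBinCore v n) else false) := by
      intro v hv
      rw [pvBinCore_low n v (List.mem_range.1 hv), pvRaw_cons]
      simp [pvCInt]
    have hf1 : (List.range (2 ^ n)).filter (fun v => pvRaw vals (pvBinCore v (n + 1)))
        = if vals.getD 0 (-1) = -1 ∨ vals.getD 0 (-1) = 0 then
            (List.range (2 ^ n)).filter (fun v => pvRaw vals.tail (pvBinCore v n)) else [] := by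
      rw [List.filter_congr hcg1, pvFilterIte]
    have hcg2 : ∀ v ∈ List.range (2 ^ n), pvRaw vals (pvBinCore (2 ^ n + v) (n + 1))
        = (if vals.getD 0 (-1) = -1 ∨ vals.getD 0 (-1) = 1 then
             pvRaw vals.tail (pvBinCore v n) else false) := by
      intro v hv
      rw [pvBinCore_high n v (List.mem_range.1 hv), pvRaw_cons]
      simp [pvCInt]
    have hf2 : ((List.range (2 ^ n)).map (fun v => 2 ^ n + v)).filter
          (fun v => pvRaw vals (pvBinCore v (n + 1)))
        = (if vals.getD 0 (-1) = -1 ∨ vals.getD 0 (-1) = 1 then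
            (List.range (2 ^ n)).filter (fun v => pvRaw vals.tail (pvBinCore v n)) else []).map
            (fun v => 2 ^ n + v) := by
      rw [List.filter_map]
      congr 1
      simp only [Function.comp_def]
      rw [List.filter_congr hcg2, pvFilterIte]
    rw [hsplit, List.filter_append, hf1, hf2, List.map_append, pvTvOf_succ]
    by_cases hgood : vals.getD 0 (-1) = -1 ∨ vals.getD 0 (-1) = 0 ∨ vals.getD 0 (-1) = 1
    · have ihs := ih vals.tail (pvCond_tail n vals hgood hc)
      simp only [List.map_map, apply_ite (List.map Int.ofNat),
        apply_ite (List.map (Int.ofNat ∘ fun v => 2 ^ n + v)), List.map_nil]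
      rw [pvCastShift, ihs]
      simp only [pvSpec, pvTvOf_length, Nat.cast_pow, Nat.cast_ofNat]
      simp only [or_comm]
    · have g1 : ¬ vals.getD 0 (-1) = -1 := fun h => hgood (Or.inl h)
      have g2 : ¬ vals.getD 0 (-1) = 0 := fun h => hgood (Or.inr (Or.inl h))
      have g3 : ¬ vals.getD 0 (-1) = 1 := fun h => hgood (Or.inr (Or.inr h))
      simp only [pvSpec]
      rw [if_neg (by tauto), if_neg (by tauto), if_neg (by tauto), if_neg (by tauto)]
      simp

-- characterizations of the two ports ---------------------------------------

theorem pvA_char (tm : List (String × Int)) (nv : Int) :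
    get_term_cells tm nv =
      ((List.range (2 ^ nv.toNat)).filter
        (fun v => pvMatchLoop (PySem.Dict.ofList tm) (PySem.Dict.ofList tm).items
          (pvBinStr v nv.toNat))).map (Int.ofNat) := by
  unfold get_term_cells
  rw [PySem.List.foldl_append_if_eq_filter]
  rw [show ((2:Int) ^ nv.toNat) = ((2 ^ nv.toNat : Nat) : Int) by push_cast; ring,
    PySem.List.pyRange_zero_natCast, List.filter_map]
  simp only [List.nil_append]
  rw [show (fun k : Nat => (k : Int)) = Int.ofNat from rfl]
  rfl

theorem pvMatch_eq_raw' (tm : List (String × Int)) (bs : List Char) :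
    pvMatchLoop (PySem.Dict.ofList tm) (PySem.Dict.ofList tm).items bs
      = pvRaw (PySem.Dict.ofList tm).values bs := by
  rw [pvMatchLoop_eq_raw (PySem.Dict.ofList tm) _ (fun p hp => hp)
    (PySem.Dict.nodup_keys_ofList tm) bs]
  simp only [PySem.Dict.values]

theorem pvB_char (tm : List (String × Int)) (nv : Int) :
    get_term_cells_alt tm nv = pvSpec (pvTvOf nv.toNat (PySem.Dict.ofList tm).values) := by
  unfold get_term_cells_alt
  rw [pvAltLoop_inv]
  simp [pvTvOf]

theorem pvNotD_head (w : Int) (ws : List Int)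
    (hd : ¬((w :: ws) ≠ [] ∧ (w :: ws).headD 0 ≠ -1 ∧ (w :: ws).headD 0 ≠ 0)) :
    w = -1 ∨ w = 0 := by
  by_cases h1 : w = -1
  · exact Or.inl h1
  · by_cases h2 : w = 0
    · exact Or.inr h2
    · refine absurd ⟨by simp, ?_, ?_⟩ hd
      · simpa using h1
      · simpa using h2

-- assembling the verdict ----------------------------------------------------

theorem get_term_cells_spec : Claim_unchanged_get_term_cells := by
  unfold Claim_unchanged_get_term_cells
  intro tm nv _hdom hpre
  unfold Spec_get_term_cells
  intro hnD
  obtain ⟨hnn, hpre2⟩ := hpre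
  unfold D_get_term_cells at hnD
  rw [pvA_char, pvB_char]
  by_cases h0 : nv = 0
  · -- num_vars = 0: the single cell 0; the phantom digit '0' still matches (¬D)
    subst h0
    have hv : ∀ vals : List Int, (¬ (vals ≠ [] ∧ vals.headD 0 ≠ -1 ∧ vals.headD 0 ≠ 0)) →
        ((vals.drop 1).any (fun v => !(v == -1)) = false) →
        pvRaw vals ['0'] = true := by
      intro vals hd hps
      cases vals with
      | nil => rfl
      | cons w ws =>
        have hw : w = -1 ∨ w = 0 := pvNotD_head w ws hd
        rw [pvRaw_cons]
        have hws : pvRaw ws [] = true := by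
          rw [pvRaw_nil]
          simpa using hps
        rcases hw with h | h <;> simp [h, pvCInt, hws]
    have hps : ((PySem.Dict.ofList tm).values.drop 1).any (fun v => !(v == -1)) = false := by
      by_cases ha : ((PySem.Dict.ofList tm).values.drop 1).any (fun v => !(v == -1)) = true
      · exfalso
        apply hpre2
        refine ⟨by simpa using ha, ?_⟩
        cases hvv : (PySem.Dict.ofList tm).values with
        | nil => simp
        | cons w ws =>
          have hd := hnD
          rw [hvv] at hd
          have hw : w = -1 ∨ w = 0 := pvNotD_head w ws (by simpa using hd)
          rcases hw with h | h <;> simp [h]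
      · simpa using ha
    have := hv (PySem.Dict.ofList tm).values (by simpa using hnD) hps
    simp [pvBinStr, pvMatch_eq_raw', this, pvTvOf, pvSpec]
  · -- num_vars ≥ 1
    have hn1 : nv.toNat ≠ 0 := by omega
    have hmax : max nv.toNat 1 = nv.toNat := by omega
    rw [hmax] at hpre2
    have hc : ((PySem.Dict.ofList tm).values.drop nv.toNat).all (· == -1) = true ∨
        ¬ (((PySem.Dict.ofList tm).values.take nv.toNat).all
            (fun v => v == -1 || v == 0 || v == 1) = true) := by
      by_cases hA : ((PySem.Dict.ofList tm).values.drop nv.toNat).all (· == -1) = true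
      · exact Or.inl hA
      · right
        intro hB
        apply hpre2
        constructor
        · have := hA
          simp only [List.all_eq_true] at this
          simp only [List.any_eq_true]
          by_contra hno
          apply this
          intro x hx
          by_contra hxx
          exact hno ⟨x, hx, by simpa using hxx⟩
        · simp only [List.all_eq_true] at hB ⊢
          intro x hx
          have := hB x hx
          simp [h0] at this ⊢
          tauto
    rw [← pvMain nv.toNat (PySem.Dict.ofList tm).values hc]
    congr 1
    apply List.filter_congr
    intro v _
    rw [pvMatch_eq_raw', pvBinStr, if_neg hn1]

theorem get_term_cells_changed : Claim_changed_get_term_cells := by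
  unfold Claim_changed_get_term_cells
  decide

theorem get_term_cells_tight : Claim_exact_get_term_cells := by
  unfold Claim_exact_get_term_cells
  intro tm nv _hdom _hpre hD
  obtain ⟨h0, hne, h1, h2⟩ := hD
  subst h0
  rw [pvA_char, pvB_char]
  cases hvv : (PySem.Dict.ofList tm).values with
  | nil => exact absurd hvv hne
  | cons w ws =>
    have hraw : pvRaw (PySem.Dict.ofList tm).values ['0'] = false := by
      rw [hvv, pvRaw_cons]
      rw [hvv] at h1 h2
      simp only [List.headD_cons] at h1 h2
      simp [pvCInt, h1, h2]
    simp [pvBinStr, pvMatch_eq_raw', hraw, pvTvOf, pvSpec]
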